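-- pv_equiv track=rewrite | github.com/SixQuant/sixquant | sixquant/data/concept.py | parse_concepts_compact_text
-- ===== SOURCE A (Python) =====
-- def parse_concepts_compact_text(text):
--     """
--     解析紧凑格式的概念数据文本
--     :return:
--     """
--     code_concepts = {}  # 股票所属概念字典
--     concept_codes = {}  # 概念下属股票字典
--     for line in text.split('\n'):
--         n = len(line)
--         if n > 0:
--             if line[0] == '#':
--                 concept = line[1:]
--             else:
--                 code = line
--                 try:
--                     a = concept_codes[concept]
--                 except KeyError:
--                     a = []
--                     concept_codes[concept] = a
--                 a.append(code)
--                 try: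
--                     a = code_concepts[code]
--                 except KeyError:
--                     a = []
--                     code_concepts[code] = a
--                 a.append(concept)
--
--     return concept_codes, code_concepts
-- ===== SOURCE B (Python) =====
-- def parse_concepts_compact_text(text):
--     # Phase 1: one scan of the lines producing a flat (concept, code) pair list.
--     pairs = []
--     for line in text.split('\n'):
--         if len(line) > 0:
--             if line[0] == '#':
--                 concept = line[1:]
--             else:
--                 pairs.append((concept, line))
--     # Phase 2: group codes by concept.
--     concept_codes = {}
--     for concept, code in pairs:
--         concept_codes.setdefault(concept, []).append(code)
--     # Phase 3: group concepts by code.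
--     code_concepts = {}
--     for concept, code in pairs:
--         code_concepts.setdefault(code, []).append(concept)
--     return concept_codes, code_concepts
-- ===== Notes on version B (the rewrite author's own statement) =====
-- stated objective: alternative
-- what changed: B splits the work into three phases — one scan of the lines producing a flat (concept, code) pair list, then two independent setdefault/append grouping loops over that list — instead of A's single pass that updates both dicts with try/except while parsing.
import Mathlib
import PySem

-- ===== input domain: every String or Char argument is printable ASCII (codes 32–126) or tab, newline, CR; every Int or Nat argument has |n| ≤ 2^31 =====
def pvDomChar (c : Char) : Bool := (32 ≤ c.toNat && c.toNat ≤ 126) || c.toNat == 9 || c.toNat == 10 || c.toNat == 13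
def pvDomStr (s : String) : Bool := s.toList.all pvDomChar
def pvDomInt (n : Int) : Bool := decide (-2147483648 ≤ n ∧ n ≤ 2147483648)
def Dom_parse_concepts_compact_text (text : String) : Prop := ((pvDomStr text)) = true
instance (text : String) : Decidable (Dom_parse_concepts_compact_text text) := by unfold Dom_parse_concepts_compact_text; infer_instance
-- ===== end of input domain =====

-- B replaces A's single combined pass with an intermediate (concept, code) pair list and two
-- separate grouping loops (objective: alternative decomposition, same cost).

-- ===== PORT A =====
-- text.split('\n'); the separator is the nonempty literal "\n", so split? is always some.
def pvLines (text : String) : List String := (PySem.Str.split? text "\n").getD []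
-- A's try/except KeyError + list append: d[k] becomes d.get(k, []) with v appended.
def pvAAdd (d : PySem.Dict String (List String)) (k v : String) : PySem.Dict String (List String) :=
  match d.get? k with
  | some a => d.insert k (a ++ [v])
  | none   => d.insert k ([] ++ [v])

-- one iteration of A's loop; state = (concept_codes, code_concepts, current concept).
-- on a code line before any '#' header Python raises NameError (excluded by Pre_); the port skips it.
def pvStepA (st : PySem.Dict String (List String) × PySem.Dict String (List String) × Option String)
    (line : String) : PySem.Dict String (List String) × PySem.Dict String (List String) × Option String :=
  if 0 < PySem.Str.len line then
    if PySem.Str.pyGet? line 0 = some '#' then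
      (st.1, st.2.1, some (PySem.Str.slice line (some 1) none))
    else
      match st.2.2 with
      | some concept => (pvAAdd st.1 concept line, pvAAdd st.2.1 line concept, some concept)
      | none => st
  else st

def parse_concepts_compact_text (text : String) : (List (String × List String)) × (List (String × List String)) :=
  let st := (pvLines text).foldl pvStepA (PySem.Dict.empty, PySem.Dict.empty, none)
  (st.1.items, st.2.1.items)

-- ===== PORT B =====
-- phase 1 of Source B: collect (concept, code) pairs; a code line with no concept yet raises in Python (outside Pre_).
def pvPairsStep (st : List (String × String) × Option String) (line : String) :
    List (String × String) × Option String :=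
  if 0 < PySem.Str.len line then
    if PySem.Str.pyGet? line 0 = some '#' then
      (st.1, some (PySem.Str.slice line (some 1) none))
    else
      match st.2 with
      | some concept => (st.1 ++ [(concept, line)], st.2)
      | none => st
  else st

def parse_concepts_compact_text_alt (text : String) : (List (String × List String)) × (List (String × List String)) :=
  let pairs := ((pvLines text).foldl pvPairsStep ([], none)).1
  -- setdefault(k, []).append(v) = modify k [] (· ++ [v])
  let concept_codes := pairs.foldl (fun d p => d.modify p.1 [] (· ++ [p.2])) PySem.Dict.empty
  let code_concepts := pairs.foldl (fun d p => d.modify p.2 [] (· ++ [p.1])) PySem.Dict.empty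
  (concept_codes.items, code_concepts.items)

-- ===== PRECONDITION & SPEC =====
-- Pre_ excludes texts whose first nonempty line is not a '#' header: there Python A (and B alike)
-- raises NameError ('concept' unbound), returning no value.
def Pre_parse_concepts_compact_text (text : String) : Prop :=
  PySem.Str.startswith
    (((pvLines text).filter (fun l => 0 < PySem.Str.len l)).headD "#") "#" = true

instance (text : String) : Decidable (Pre_parse_concepts_compact_text text) := by
  unfold Pre_parse_concepts_compact_text; infer_instance

def pvWitness_parse_concepts_compact_text : String := "#tech\n600000\n600001\n#bank\n600000"

def Spec_parse_concepts_compact_text (text : String)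
    (out : (List (String × List String)) × (List (String × List String))) : Prop :=
  out = parse_concepts_compact_text_alt text

instance (text : String) (out : (List (String × List String)) × (List (String × List String))) :
    Decidable (Spec_parse_concepts_compact_text text out) := by
  unfold Spec_parse_concepts_compact_text; infer_instance

-- ===== CLAIM (what is proved, stated in full; the proofs are below) =====
def Claim_equal_parse_concepts_compact_text : Prop :=
  ∀ (text : String), Dom_parse_concepts_compact_text text →
    Pre_parse_concepts_compact_text text →
    Spec_parse_concepts_compact_text text (parse_concepts_compact_text text)

-- ===== LEMMAS AND PROOFS =====

-- the pair list produced by a run of the lines from a given current concept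
def pvPairs : List String → Option String → List (String × String)
  | [], _ => []
  | l :: ls, c =>
    if 0 < PySem.Str.len l then
      if PySem.Str.pyGet? l 0 = some '#' then pvPairs ls (some (PySem.Str.slice l (some 1) none))
      else match c with
        | some concept => (concept, l) :: pvPairs ls c
        | none => pvPairs ls c
    else pvPairs ls c

-- the concept in force after a run of the lines
def pvLast : List String → Option String → Option String
  | [], c => c
  | l :: ls, c =>
    if 0 < PySem.Str.len l then
      if PySem.Str.pyGet? l 0 = some '#' then pvLast ls (some (PySem.Str.slice l (some 1) none))
      else pvLast ls c
    else pvLast ls c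

theorem pvAAdd_eq_modify (d : PySem.Dict String (List String)) (k v : String) :
    pvAAdd d k v = d.modify k [] (· ++ [v]) := by
  unfold pvAAdd PySem.Dict.modify
  rw [PySem.Dict.getD_eq_get?_getD]
  cases d.get? k <;> simp

theorem pvB_fold (ls : List String) :
    ∀ (acc : List (String × String)) (c : Option String),
      ls.foldl pvPairsStep (acc, c) = (acc ++ pvPairs ls c, pvLast ls c) := by
  induction ls with
  | nil => intro acc c; simp [pvPairs, pvLast]
  | cons l ls ih =>
    intro acc c
    by_cases h1 : 0 < PySem.Str.len l
    · by_cases h2 : PySem.Str.pyGet? l 0 = some '#'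
      · simp only [List.foldl_cons, pvPairsStep, pvPairs, pvLast, if_pos h1, if_pos h2, ih]
      · cases c with
        | none =>
          simp only [List.foldl_cons, pvPairsStep, pvPairs, pvLast, if_pos h1, if_neg h2, ih]
        | some concept =>
          simp only [List.foldl_cons, pvPairsStep, pvPairs, pvLast, if_pos h1, if_neg h2, ih,
            List.append_assoc, List.singleton_append]
    · simp only [List.foldl_cons, pvPairsStep, pvPairs, pvLast, if_neg h1, ih]

theorem pvA_fold (ls : List String) :
    ∀ (cc ck : PySem.Dict String (List String)) (c : Option String),
      ls.foldl pvStepA (cc, ck, c) =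
        ((pvPairs ls c).foldl (fun d p => d.modify p.1 [] (· ++ [p.2])) cc,
         (pvPairs ls c).foldl (fun d p => d.modify p.2 [] (· ++ [p.1])) ck,
         pvLast ls c) := by
  induction ls with
  | nil => intro cc ck c; simp [pvPairs, pvLast]
  | cons l ls ih =>
    intro cc ck c
    by_cases h1 : 0 < PySem.Str.len l
    · by_cases h2 : PySem.Str.pyGet? l 0 = some '#'
      · simp only [List.foldl_cons, pvStepA, pvPairs, pvLast, if_pos h1, if_pos h2, ih]
      · cases c with
        | none =>
          simp only [List.foldl_cons, pvStepA, pvPairs, pvLast, if_pos h1, if_neg h2, ih]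
        | some concept =>
          simp only [List.foldl_cons, pvStepA, pvPairs, pvLast, if_pos h1, if_neg h2, ih,
            pvAAdd_eq_modify]
    · simp only [List.foldl_cons, pvStepA, pvPairs, pvLast, if_neg h1, ih]

-- ===== VERDICT (by name: the statement is the Claim_ definition above) =====
theorem parse_concepts_compact_text_spec : Claim_equal_parse_concepts_compact_text := by
  intro text _ _
  unfold Spec_parse_concepts_compact_text parse_concepts_compact_text parse_concepts_compact_text_alt
  simp only [pvA_fold, pvB_fold, List.nil_append]
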